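-- pv_equiv track=rewrite | github.com/nicloh-afk/tcx1002 | combined_mocktests.py | zigzag_fill
-- ===== SOURCE A (Python) =====
-- def sqrt_ceil(n):
--   res = 0
--   while res*res<n:
--     res+=1
--   return res
--
-- def zigzag_fill(s):
--   if len(s)==0:
--     return [[]]
--   n = sqrt_ceil(len(s))
--   s = list(s.ljust(n*n,' '))
--
--   res = []
--   for i in range(n):
--     row = list(s[i*n:(i*n)+n]) # key to grid like format
--     if i%2==1: # reverse odd rows only
--       row.reverse()
--     res.append(row)
--   return res
-- ===== SOURCE B (Python) =====
-- def zigzag_fill(s):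
--     L = len(s)
--     if L == 0:
--         return [[]]
--     # least n with n*n >= L, by binary search
--     lo, hi = 0, L
--     while lo < hi:
--         mid = (lo + hi) // 2
--         if mid * mid < L:
--             lo = mid + 1
--         else:
--             hi = mid
--     n = lo
--     padded = s.ljust(n * n, ' ')
--     res = [[' '] * n for _ in range(n)]
--     for i, ch in enumerate(padded):
--         r = i // n
--         c = i % n
--         if r % 2 == 1:
--             c = n - 1 - c
--         res[r][c] = ch
--     return res
-- ===== Notes on version B (the rewrite author's own statement) =====
-- stated objective: alternative
-- what changed: B preallocates the n-by-n grid and, in a single enumerate pass over the padded string, writes each character directly at its final boustrophedon (row, col) position, instead of A's slicing out each row and reversing the odd ones; the grid side n is found by binary search instead of A's linear counting loop.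
import Mathlib
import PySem

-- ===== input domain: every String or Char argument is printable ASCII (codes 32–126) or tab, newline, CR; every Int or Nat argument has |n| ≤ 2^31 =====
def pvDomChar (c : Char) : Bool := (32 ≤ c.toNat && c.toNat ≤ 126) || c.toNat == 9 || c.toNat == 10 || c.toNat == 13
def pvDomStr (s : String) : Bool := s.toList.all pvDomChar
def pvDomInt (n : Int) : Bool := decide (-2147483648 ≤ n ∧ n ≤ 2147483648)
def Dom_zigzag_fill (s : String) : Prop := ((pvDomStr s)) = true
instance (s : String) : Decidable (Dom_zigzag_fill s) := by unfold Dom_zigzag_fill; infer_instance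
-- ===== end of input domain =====

-- B fills a preallocated n×n grid in one pass, placing each character of the padded
-- string directly at its final boustrophedon position (and finds n by binary search),
-- instead of A's row slicing with reversal of odd rows; same cost, different structure.

-- ===== PORT A =====
-- while res*res < n: res += 1  (literal port of sqrt_ceil's loop)
def sqrtCeilAux (n res : Nat) : Nat :=
  if h : res * res < n then sqrtCeilAux n (res + 1) else res
termination_by n - res * res
decreasing_by
  have : res * res < (res + 1) * (res + 1) := by nlinarith
  omega

def zigzag_fill (s : String) : List (List String) :=
  let cs := s.toList
  if cs.length = 0 then [[]]
  else
    let n := sqrtCeilAux cs.length 0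
    -- s = list(s.ljust(n*n, ' ')) : pad on the right with spaces up to n*n
    let padded := cs ++ List.replicate (n * n - cs.length) ' '
    -- for i in range(n): row = s[i*n:(i*n)+n]; reverse if i odd; append
    (List.range n).map (fun i =>
      let row := (padded.drop (i * n)).take n
      let row := if i % 2 = 1 then row.reverse else row
      row.map (fun c => String.ofList [c]))

-- ===== PORT B =====
-- binary search for the least n with n*n ≥ L
def bsearchSqrtCeil (L lo hi : Nat) : Nat :=
  if h : lo < hi then
    let mid := (lo + hi) / 2
    if mid * mid < L then bsearchSqrtCeil L (mid + 1) hi else bsearchSqrtCeil L lo mid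
  else lo
termination_by hi - lo
decreasing_by all_goals omega

-- res[r][c] = ch for one enumerated character (r = i / n; c flipped on odd rows)
def fillStep (n : Nat) (acc : List (List Char)) (p : Char × Nat) : List (List Char) :=
  let r := p.2 / n
  let c := if r % 2 = 1 then n - 1 - p.2 % n else p.2 % n
  acc.modify r (fun row => row.set c p.1)

def zigzag_fill_alt (s : String) : List (List String) :=
  let cs := s.toList
  let L := cs.length
  if L = 0 then [[]]
  else
    let n := bsearchSqrtCeil L 0 L
    let padded := cs ++ List.replicate (n * n - L) ' '   -- s.ljust(n*n, ' ')
    let init : List (List Char) := List.replicate n (List.replicate n ' ')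
    let grid := padded.zipIdx.foldl (fillStep n) init    -- for i, ch in enumerate(padded)
    grid.map (fun row => row.map (fun c => String.ofList [c]))

-- ===== PRECONDITION & SPEC =====
def Spec_zigzag_fill (s : String) (out : List (List String)) : Prop := out = zigzag_fill_alt s
instance (s : String) (out : List (List String)) : Decidable (Spec_zigzag_fill s out) := by unfold Spec_zigzag_fill; infer_instance

-- ===== CLAIM (what is proved, stated in full; the proofs are below) =====
def Claim_equal_zigzag_fill : Prop := ∀ (s : String), Dom_zigzag_fill s → Spec_zigzag_fill s (zigzag_fill s)


-- ===== LEMMAS AND PROOFS =====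

-- target column of the c-th element of row r in an n-wide boustrophedon grid
def tcol (n r c : Nat) : Nat := if r % 2 = 1 then n - 1 - c else c

-- flat index in the padded string that ends up at grid position (r, c)
def posIdx (n r c : Nat) : Nat := r * n + tcol n r c

-- total cell accessor for a grid
def cellOf (g : List (List Char)) (r c : Nat) : Char := (g.getD r []).getD c ' '

theorem tcol_lt (n r c : Nat) (hc : c < n) : tcol n r c < n := by
  unfold tcol; split <;> omega

theorem tcol_invol (n r c : Nat) (hc : c < n) : tcol n r (tcol n r c) = c := by
  unfold tcol; split <;> omega

theorem posIdx_lt (n r c : Nat) (hr : r < n) (hc : c < n) : posIdx n r c < n * n := by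
  have h1 := tcol_lt n r c hc
  unfold posIdx
  calc r * n + tcol n r c < r * n + n := by omega
    _ = (r + 1) * n := by ring
    _ ≤ n * n := Nat.mul_le_mul_right n (by omega)

theorem posIdx_eq_iff (n r c i : Nat) (hn : 0 < n) (hr : r < n) (hc : c < n) :
    posIdx n r c = i ↔ (i / n = r ∧ c = tcol n r (i % n)) := by
  constructor
  · intro h
    have ht := tcol_lt n r c hc
    have hdiv : i / n = r := by
      rw [← h]; unfold posIdx
      rw [Nat.mul_comm r n, Nat.mul_add_div hn, Nat.div_eq_of_lt ht]
      omega
    have hmod : i % n = tcol n r c := by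
      rw [← h]; unfold posIdx
      rw [Nat.mul_comm r n, Nat.mul_add_mod, Nat.mod_eq_of_lt ht]
    exact ⟨hdiv, by rw [hmod, tcol_invol n r c hc]⟩
  · rintro ⟨h1, h2⟩
    have hm : i % n < n := Nat.mod_lt _ hn
    unfold posIdx
    rw [h2, tcol_invol n r _ hm, ← h1, Nat.mul_comm]
    exact Nat.div_add_mod i n

theorem fillStep_length (n : Nat) (acc : List (List Char)) (p : Char × Nat) :
    (fillStep n acc p).length = acc.length := by
  unfold fillStep; simp [List.length_modify]

theorem fillStep_row_length (n : Nat) (acc : List (List Char)) (p : Char × Nat) (r : Nat) :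
    ((fillStep n acc p).getD r []).length = (acc.getD r []).length := by
  unfold fillStep
  simp only [List.getD_eq_getElem?_getD, List.getElem?_modify]
  cases h : acc[r]? with
  | none => simp
  | some row => simp only [Option.getD_some]; split <;> simp [List.length_set]

theorem cell_fillStep (n : Nat) (hn : 0 < n) (acc : List (List Char))
    (hlen : acc.length = n) (hrow : ∀ r, r < n → (acc.getD r []).length = n)
    (ch : Char) (i : Nat) (hi : i < n * n) (r c : Nat) (hr : r < n) (hc : c < n) :
    cellOf (fillStep n acc (ch, i)) r c = if posIdx n r c = i then ch else cellOf acc r c := by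
  have hrl : r < acc.length := by omega
  have hsome : acc[r]? = some acc[r] := List.getElem?_eq_getElem hrl
  have hrowr : (acc.getD r []).length = n := hrow r hr
  have hrowr' : acc[r].length = n := by
    rw [List.getD_eq_getElem acc [] hrl] at hrowr; exact hrowr
  unfold cellOf fillStep
  simp only [List.getD_eq_getElem?_getD, List.getElem?_modify, hsome, Option.map_eq_map,
    Option.map_some, Option.getD_some]
  by_cases hdr : i / n = r
  · rw [if_pos hdr]
    -- the written column in row r
    have hcol : (if i / n % 2 = 1 then n - 1 - i % n else i % n) = tcol n r (i % n) := by
      rw [hdr]; rfl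
    rw [hcol]
    by_cases hcc : c = tcol n r (i % n)
    · have hpos : posIdx n r c = i := by
        rw [posIdx_eq_iff n r c i hn hr hc]; exact ⟨hdr, hcc⟩
      rw [if_pos hpos, ← hcc]
      rw [List.getElem?_set, if_pos rfl, if_pos (by omega)]
      rfl
    · have hpos : ¬ posIdx n r c = i := by
        rw [posIdx_eq_iff n r c i hn hr hc]; tauto
      rw [if_neg hpos]
      rw [List.getElem?_set, if_neg (fun h => hcc h.symm)]
  · rw [if_neg hdr]
    have hpos : ¬ posIdx n r c = i := by
      rw [posIdx_eq_iff n r c i hn hr hc]; tauto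
    rw [if_neg hpos]

theorem fold_inv (n : Nat) (hn : 0 < n) (padded : List Char) (hp : padded.length = n * n) :
    ∀ (d k : Nat), n * n - k = d → k ≤ n * n → ∀ (acc : List (List Char)),
    acc.length = n → (∀ r, r < n → (acc.getD r []).length = n) →
    ((padded.zipIdx.drop k).foldl (fillStep n) acc).length = n ∧
    (∀ r, r < n → (((padded.zipIdx.drop k).foldl (fillStep n) acc).getD r []).length = n) ∧
    (∀ r c, r < n → c < n →
      cellOf ((padded.zipIdx.drop k).foldl (fillStep n) acc) r c =
        if k ≤ posIdx n r c then padded.getD (posIdx n r c) ' ' else cellOf acc r c) := by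
  intro d
  induction d with
  | zero =>
    intro k hd hk acc hlen hrow
    have hdrop : padded.zipIdx.drop k = [] := by
      apply List.drop_eq_nil_of_le; rw [List.length_zipIdx]; omega
    rw [hdrop]
    refine ⟨hlen, hrow, ?_⟩
    intro r c hr hc
    have := posIdx_lt n r c hr hc
    rw [if_neg (by omega)]
    rfl
  | succ d ih =>
    intro k hd hk acc hlen hrow
    have hk' : k < n * n := by omega
    have hkE : k < padded.zipIdx.length := by rw [List.length_zipIdx]; omega
    have hdrop : padded.zipIdx.drop k = padded.zipIdx[k] :: padded.zipIdx.drop (k + 1) :=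
      List.drop_eq_getElem_cons hkE
    have hgetE : padded.zipIdx[k] = (padded[k], k) := by
      rw [List.getElem_zipIdx]; simp
    rw [hdrop, List.foldl_cons, hgetE]
    set acc' := fillStep n acc (padded[k], k) with hacc'
    have hlen' : acc'.length = n := by rw [hacc', fillStep_length, hlen]
    have hrow' : ∀ r, r < n → (acc'.getD r []).length = n := by
      intro r hr; rw [hacc', fillStep_row_length]; exact hrow r hr
    obtain ⟨h1, h2, h3⟩ := ih (k + 1) (by omega) (by omega) acc' hlen' hrow'
    refine ⟨h1, h2, ?_⟩
    intro r c hr hc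
    rw [h3 r c hr hc]
    have hcell : cellOf acc' r c = if posIdx n r c = k then padded[k] else cellOf acc r c := by
      rw [hacc']
      exact cell_fillStep n hn acc hlen hrow padded[k] k (by omega) r c hr hc
    by_cases hge : k + 1 ≤ posIdx n r c
    · rw [if_pos hge, if_pos (by omega)]
    · rw [if_neg hge, hcell]
      by_cases heq : posIdx n r c = k
      · rw [if_pos heq, if_pos (by omega), heq]
        rw [List.getD_eq_getElem padded ' ' (by omega)]
      · rw [if_neg heq, if_neg (by omega)]

theorem sq_lt_iff (L res : Nat) (hL : 1 ≤ L) :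
    res * res < L ↔ res < Nat.sqrt (L - 1) + 1 := by
  rw [Nat.lt_succ_iff, Nat.le_sqrt]
  omega

theorem sqrtCeilAux_eq (L : Nat) (hL : 1 ≤ L) :
    ∀ d res, Nat.sqrt (L - 1) + 1 - res = d → res ≤ Nat.sqrt (L - 1) + 1 →
    sqrtCeilAux L res = Nat.sqrt (L - 1) + 1 := by
  intro d
  induction d with
  | zero =>
    intro res h1 h2
    unfold sqrtCeilAux
    have hres : ¬ res * res < L := by rw [sq_lt_iff L res hL]; omega
    rw [dif_neg hres]; omega
  | succ d ihd =>
    intro res h1 h2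
    unfold sqrtCeilAux
    have hres : res * res < L := by rw [sq_lt_iff L res hL]; omega
    rw [dif_pos hres]
    exact ihd (res + 1) (by omega) (by omega)

theorem bsearch_eq (L : Nat) (hL : 1 ≤ L) :
    ∀ m lo hi, hi - lo ≤ m → lo ≤ Nat.sqrt (L - 1) + 1 → Nat.sqrt (L - 1) + 1 ≤ hi →
    bsearchSqrtCeil L lo hi = Nat.sqrt (L - 1) + 1 := by
  intro m
  induction m with
  | zero =>
    intro lo hi h1 h2 h3
    unfold bsearchSqrtCeil
    rw [dif_neg (by omega : ¬ lo < hi)]; omega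
  | succ m ihm =>
    intro lo hi h1 h2 h3
    unfold bsearchSqrtCeil
    by_cases hlh : lo < hi
    · rw [dif_pos hlh]
      by_cases hc : (lo + hi) / 2 * ((lo + hi) / 2) < L
      · rw [if_pos hc]
        rw [sq_lt_iff _ _ hL] at hc
        exact ihm ((lo + hi) / 2 + 1) hi (by omega) (by omega) h3
      · rw [if_neg hc]
        rw [sq_lt_iff _ _ hL] at hc
        exact ihm lo ((lo + hi) / 2) (by omega) h2 (by omega)
    · rw [dif_neg hlh]; omega

-- ===== VERDICT (by name: the statement is the Claim_ definition above) =====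
theorem zigzag_fill_spec : Claim_equal_zigzag_fill := by
  intro s _
  unfold Spec_zigzag_fill
  simp only [zigzag_fill, zigzag_fill_alt]
  by_cases h0 : s.toList.length = 0
  · simp [h0]
  · rw [if_neg h0, if_neg h0]
    have hL : 1 ≤ s.toList.length := by omega
    set L := s.toList.length with hLdef
    set t := Nat.sqrt (L - 1) + 1 with htdef
    have hA : sqrtCeilAux L 0 = t := sqrtCeilAux_eq L hL t 0 (by omega) (by omega)
    have htL : t ≤ L := by
      have := Nat.sqrt_le_self (L - 1); omega
    have hB : bsearchSqrtCeil L 0 L = t := bsearch_eq L hL L 0 L (by omega) (by omega) htL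
    rw [hA, hB]
    have hn : 0 < t := by omega
    have hLle : L ≤ t * t := by
      have := Nat.lt_succ_sqrt (L - 1)
      have : L - 1 < t * t := by rw [htdef]; exact this
      omega
    set padded := s.toList ++ List.replicate (t * t - L) ' ' with hpad
    have hplen : padded.length = t * t := by
      rw [hpad]; simp only [List.length_append, List.length_replicate, ← hLdef]; omega
    have hinit_len : (List.replicate t (List.replicate t ' ')).length = t := by simp
    have hinit_row : ∀ r, r < t →
        ((List.replicate t (List.replicate t ' ')).getD r []).length = t := by
      intro r hr
      rw [List.getD_eq_getElem?_getD, List.getElem?_replicate, if_pos hr]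
      simp
    obtain ⟨hg1, hg2, hg3⟩ := fold_inv t hn padded hplen (t * t) 0 (by omega) (by omega)
      (List.replicate t (List.replicate t ' ')) hinit_len hinit_row
    rw [List.drop_zero] at hg1 hg2 hg3
    set g := padded.zipIdx.foldl (fillStep t) (List.replicate t (List.replicate t ' ')) with hg
    -- each resulting cell is the padded character at its source index
    have hcell : ∀ r c, r < t → c < t → cellOf g r c = padded.getD (posIdx t r c) ' ' := by
      intro r c hr hc
      rw [hg3 r c hr hc, if_pos (Nat.zero_le _)]
    apply List.ext_getElem
    · simp [hg1]
    · intro r h1 h2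
      have hr : r < t := by simpa using h1
      have hgr : r < g.length := by omega
      have hrowlen : g[r].length = t := by
        have := hg2 r hr
        rw [List.getD_eq_getElem g [] hgr] at this; exact this
      have hsub_len : ((padded.drop (r * t)).take t).length = t := by
        rw [List.length_take, List.length_drop, hplen]
        have : (r + 1) * t ≤ t * t := Nat.mul_le_mul_right t (by omega)
        have : r * t + t ≤ t * t := by nlinarith
        omega
      have hdroplen : r * t + t ≤ padded.length := by
        rw [hplen]
        have : (r + 1) * t ≤ t * t := Nat.mul_le_mul_right t (by omega)
        nlinarith
      simp only [List.getElem_map, List.getElem_range]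
      congr 1
      apply List.ext_getElem
      · rw [hrowlen]
        split
        · rw [List.length_reverse, hsub_len]
        · rw [hsub_len]
      · intro c hcl hcr
        have hc : c < t := by
          rw [hrowlen] at hcr; exact hcr
        have hcg : g[r][c] = cellOf g r c := by
          rw [cellOf, List.getD_eq_getElem g [] hgr, List.getD_eq_getElem g[r] ' ' (by omega)]
        have hpc : posIdx t r c < padded.length := by
          rw [hplen]; exact posIdx_lt t r c hr hc
        rw [hcg, hcell r c hr hc, List.getD_eq_getElem padded ' ' hpc]
        split
        · -- odd row: reversed slice
          rename_i hodd
          rw [List.getElem_reverse, List.getElem_take, List.getElem_drop]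
          congr 1
          rw [hsub_len]
          unfold posIdx tcol
          rw [if_pos hodd]
        · -- even row
          rename_i heven
          rw [List.getElem_take, List.getElem_drop]
          congr 1
          unfold posIdx tcol
          rw [if_neg heven]
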